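-- pv_equiv track=rewrite | github.com/wndgur2/wndgur2.github.io | python/기타/조합0text.py | factNTen
-- ===== SOURCE A (Python) =====
-- def nTen(t):
--     two = 0
--     five = 0
--     temp = 2
--     while t > 1:
--         if(t % temp == 0):
--             t = int(t/temp)
--             if temp == 2:
--                 two += 1
--             elif temp == 5:
--                 five += 1
--             temp = 2
--         else:
--             temp += 1
--     return [two, five]
--
-- def factNTen(t):
--     tTwo = 0
--     tFive = 0
--     for i in range(2, t+1):
--         res = nTen(i)
--         tTwo += res[0]
--         tFive += res[1]
--     return [tTwo, tFive]
-- ===== SOURCE B (Python) =====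
-- def factNTen(t):
--     # Legendre's formula: the exponent of p in t! is sum of t // p**k over k >= 1.
--     def legendre(p):
--         total = 0
--         pk = p
--         while pk <= t:
--             total += t // pk
--             pk *= p
--         return total
--     return [legendre(2), legendre(5)]
-- ===== Notes on version B (the rewrite author's own statement) =====
-- stated objective: faster
-- what changed: Replaces the per-number trial-division factorization of every integer up to t by Legendre's formula, directly summing the floor-divisions of t by the powers of each of the two primes.
import Mathlib
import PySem

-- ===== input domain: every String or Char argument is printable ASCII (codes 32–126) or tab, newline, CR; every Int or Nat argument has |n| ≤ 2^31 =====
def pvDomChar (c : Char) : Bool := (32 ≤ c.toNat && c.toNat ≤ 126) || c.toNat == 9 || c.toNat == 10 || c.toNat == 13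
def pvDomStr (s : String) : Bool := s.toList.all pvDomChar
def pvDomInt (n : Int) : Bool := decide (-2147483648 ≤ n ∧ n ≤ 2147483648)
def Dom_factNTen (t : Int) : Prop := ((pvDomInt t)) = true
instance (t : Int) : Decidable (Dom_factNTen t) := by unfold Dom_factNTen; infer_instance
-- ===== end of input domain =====

-- B replaces A's per-number trial division over all integers up to t by Legendre's formula (summing the floor-divisions of t by prime powers); measured faster.

-- ===== PORT A =====
-- while loop of nTen; the Nat argument is a fuel guard only (the chosen fuel is proved
-- sufficient below, so the fuel-0 branch is never reached from nTen's call).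
def nTenLoop : Nat → Int → Int → Int → Int → List Int
  | 0, _, _, two, five => [two, five]
  | fuel+1, t, temp, two, five =>
    if 1 < t then
      if PySem.Int.mod t temp = 0 then
        -- int(t/temp): the division is exact here (t % temp == 0, operands positive and ≤ 2^31,
        -- so the float quotient is exact), hence equals floor division t / temp.
        nTenLoop fuel (t / temp) 2
          (if temp = 2 then two + 1 else two)
          (if temp = 2 then five else if temp = 5 then five + 1 else five)
      else
        nTenLoop fuel t (temp + 1) two five
    else [two, five]

def nTen (t : Int) : List Int := nTenLoop (t.toNat + 1) t 2 0 0

def factNTen (t : Int) : List Int :=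
  let r := (PySem.List.pyRange 2 (t+1) 1).foldl
    (fun (acc : Int × Int) i =>
      let res := nTen i
      -- res[0], res[1]: nTen always returns a two-element list, so the default is never used
      (acc.1 + PySem.List.pyGetD res 0 0, acc.2 + PySem.List.pyGetD res 1 0)) (0, 0)
  [r.1, r.2]

-- ===== PORT B =====
-- while loop of legendre; the Nat argument is a fuel guard only (proved sufficient below).
def legendreLoop : Nat → Int → Int → Int → Int → Int
  | 0, _, _, _, total => total
  | fuel+1, t, p, pk, total =>
    if pk ≤ t then legendreLoop fuel t p (pk * p) (total + PySem.Int.floordiv t pk)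
    else total

def legendre (t p : Int) : Int := legendreLoop (t.toNat + 1) t p p 0

def factNTen_alt (t : Int) : List Int := [legendre t 2, legendre t 5]

-- ===== PRECONDITION & SPEC =====
def Spec_factNTen (t : Int) (out : List Int) : Prop := out = factNTen_alt t
instance (t : Int) (out : List Int) : Decidable (Spec_factNTen t out) := by unfold Spec_factNTen; infer_instance

-- ===== CLAIM (what is proved, stated in full; the proofs are below) =====
def Claim_equal_factNTen : Prop := ∀ (t : Int), Dom_factNTen t → Spec_factNTen t (factNTen t)

-- ===== LEMMAS AND PROOFS =====

-- exiting A's loop: for t ≤ 1 the loop returns immediately (any fuel)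
lemma nTenLoop_exit (fuel : Nat) (t temp two five : Int) (ht : t ≤ 1) :
    nTenLoop fuel t temp two five = [two, five] := by
  cases fuel with
  | zero => rfl
  | succ f => simp [nTenLoop, show ¬ (1 < t) by omega]

-- A's inner while loop computes the 2- and 5-adic valuations of t
lemma nTenLoop_spec : ∀ (fuel : Nat) (t temp two five : Int),
    1 < t → 2 ≤ temp →
    (∀ d : Int, 2 ≤ d → d < temp → ¬ (d ∣ t)) →
    t.toNat + 2 ≤ fuel + temp.toNat →
    nTenLoop fuel t temp two five =
      [two + (padicValNat 2 t.toNat : Int), five + (padicValNat 5 t.toNat : Int)] := by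
  intro fuel
  induction fuel with
  | zero =>
    intro t temp two five ht htemp hinv hfuel
    exact absurd (dvd_refl t) (hinv t (by omega) (by omega))
  | succ f ih =>
    intro t temp two five ht htemp hinv hfuel
    haveI i5 : Fact (Nat.Prime 5) := ⟨by norm_num⟩
    simp only [nTenLoop, if_pos ht]
    by_cases h : PySem.Int.mod t temp = 0
    · rw [if_pos h]
      have hdvd : temp ∣ t := (PySem.Int.mod_eq_zero_iff_dvd t temp).mp h
      have htle : temp ≤ t := Int.le_of_dvd (by omega) hdvd
      obtain ⟨q, hq⟩ := hdvd
      have hq1 : 1 ≤ q := by nlinarith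
      have hdiv : t / temp = q := by rw [hq]; exact Int.mul_ediv_cancel_left q (by omega)
      have hTc : ((temp.toNat : Int)) = temp := Int.toNat_of_nonneg (by omega)
      have hQc : ((q.toNat : Int)) = q := Int.toNat_of_nonneg (by omega)
      have hNc : ((t.toNat : Int)) = t := Int.toNat_of_nonneg (by omega)
      have hNTQ : t.toNat = temp.toNat * q.toNat := by
        have : ((temp.toNat * q.toNat : Nat) : Int) = ((t.toNat : Int)) := by
          push_cast
          rw [hTc, hQc, hNc, hq]
        exact_mod_cast this.symm
      have hT2 : 2 ≤ temp.toNat := by omega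
      have hTprime : temp.toNat.Prime := by
        rw [Nat.prime_def_lt]
        refine ⟨hT2, fun m hm hmd => ?_⟩
        by_contra hm1
        have hm0 : m ≠ 0 := by
          rintro rfl
          rw [zero_dvd_iff] at hmd
          omega
        have hm2 : 2 ≤ m := by omega
        refine hinv (m : Int) (by exact_mod_cast hm2) (by omega) ?_
        refine dvd_trans ?_ ⟨q, hq⟩
        rw [← hTc]
        exact_mod_cast hmd
      have hQ0 : q.toNat ≠ 0 := by omega
      have hv2 : padicValNat 2 t.toNat = padicValNat 2 temp.toNat + padicValNat 2 q.toNat := by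
        rw [hNTQ]; exact padicValNat.mul (by omega) hQ0
      have hv5 : padicValNat 5 t.toNat = padicValNat 5 temp.toNat + padicValNat 5 q.toNat := by
        rw [hNTQ]; exact padicValNat.mul (by omega) hQ0
      have hvT2 : padicValNat 2 temp.toNat = if temp = 2 then 1 else 0 := by
        split_ifs with h2
        · rw [show temp.toNat = 2 by omega]
          exact padicValNat.self (by norm_num)
        · refine padicValNat.eq_zero_of_not_dvd fun hd => ?_
          have := (Nat.prime_dvd_prime_iff_eq Nat.prime_two hTprime).mp hd
          omega
      have hvT5 : padicValNat 5 temp.toNat = if temp = 5 then 1 else 0 := by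
        split_ifs with h5
        · rw [show temp.toNat = 5 by omega]
          exact padicValNat.self (by norm_num)
        · refine padicValNat.eq_zero_of_not_dvd fun hd => ?_
          have := (Nat.prime_dvd_prime_iff_eq (by norm_num) hTprime).mp hd
          omega
      rw [hdiv]
      by_cases hqle : q ≤ 1
      · have hQ1 : q.toNat = 1 := by omega
        rw [nTenLoop_exit f q 2 _ _ (by omega)]
        have hN : t.toNat = temp.toNat := by rw [hNTQ, hQ1, mul_one]
        rw [hN, hvT2, hvT5]
        split_ifs with ha hb <;> simp only [List.cons.injEq, and_true] <;> omega
      · rw [ih q 2 _ _ (by omega) (by omega) (fun d hd hd' _ => by omega) ?_]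
        · rw [hv2, hv5, hvT2, hvT5]
          split_ifs with ha hb <;> simp only [List.cons.injEq, and_true] <;> omega
        · have hmul : temp.toNat + q.toNat ≤ temp.toNat * q.toNat :=
            add_le_mul hT2 (by omega)
          omega
    · rw [if_neg h]
      refine ih t (temp + 1) two five ht (by omega) (fun d hd hlt => ?_) (by omega)
      by_cases hdt : d = temp
      · subst hdt
        intro hdvd
        exact h ((PySem.Int.mod_eq_zero_iff_dvd t d).mpr hdvd)
      · exact hinv d hd (by omega)

lemma nTen_spec (t : Int) (ht : 1 < t) :
    nTen t = [(padicValNat 2 t.toNat : Int), (padicValNat 5 t.toNat : Int)] := by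
  have := nTenLoop_spec (t.toNat + 1) t 2 0 0 ht (by omega)
    (fun d hd hd2 => by omega) (by omega)
  simpa [nTen] using this

-- sum of valuations over 2..n = valuation of n!
lemma sum_padic_eq_factorial (p : Nat) [hp : Fact p.Prime] : ∀ (n : Nat),
    ∑ i ∈ Finset.Ico 2 (n + 1), padicValNat p i = padicValNat p (Nat.factorial n) := by
  intro n
  induction n with
  | zero => simp [padicValNat_one_right]
  | succ m ihm =>
    rcases Nat.eq_zero_or_pos m with hm | hm
    · subst hm; simp [padicValNat_one_right]
    · rw [Finset.sum_Ico_succ_top (by omega), ihm, Nat.factorial_succ,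
        padicValNat.mul (by omega) (Nat.factorial_ne_zero m)]
      omega

-- all terms of the Legendre sum from exponent j on vanish once p ^ j > t
lemma legendre_tail_zero (t p : Int) (j : Nat) (hp : 2 ≤ p) (h : t < p ^ j) :
    ∑ i ∈ Finset.Ico j (Nat.log p.toNat t.toNat + 1), t.toNat / p.toNat ^ i = 0 := by
  refine Finset.sum_eq_zero fun i hi => ?_
  have hji : j ≤ i := (Finset.mem_Ico.mp hi).1
  have hpc : ((p.toNat : Int)) = p := Int.toNat_of_nonneg (by omega)
  have hlt : t.toNat < p.toNat ^ j := by
    have h1 : ((p.toNat ^ j : Nat) : Int) = p ^ j := by push_cast; rw [hpc]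
    have h2 : 0 < p.toNat ^ j := pow_pos (by omega) j
    omega
  refine Nat.div_eq_of_lt (lt_of_lt_of_le hlt ?_)
  exact Nat.pow_le_pow_right (by omega) hji

-- B's while loop computes the Legendre sum
lemma legendreLoop_spec : ∀ (fuel : Nat) (t p pk total : Int) (j : Nat),
    2 ≤ p → 1 ≤ j → pk = p ^ j → 1 < t →
    t.toNat + 1 ≤ fuel + pk.toNat →
    legendreLoop fuel t p pk total =
      total + ((∑ i ∈ Finset.Ico j (Nat.log p.toNat t.toNat + 1),
        t.toNat / p.toNat ^ i : Nat) : Int) := by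
  intro fuel
  induction fuel with
  | zero =>
    intro t p pk total j hp hj hpk ht hfuel
    have hpk2 : t < p ^ j := by omega
    rw [legendre_tail_zero t p j hp hpk2]
    simp [legendreLoop]
  | succ f ih =>
    intro t p pk total j hp hj hpk ht hfuel
    have hpc : ((p.toNat : Int)) = p := Int.toNat_of_nonneg (by omega)
    have hpkN : ((p.toNat ^ j : Nat) : Int) = pk := by push_cast; rw [hpc, hpk]
    simp only [legendreLoop]
    by_cases hle : pk ≤ t
    · rw [if_pos hle]
      have hpk2 : 2 ≤ pk := by
        have h1 : p ^ 1 ≤ p ^ j := pow_le_pow_right₀ (by omega) hj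
        rw [pow_one] at h1
        omega
      have hstep : pk + 2 ≤ pk * p := by nlinarith
      rw [ih t p (pk * p) _ (j + 1) hp (by omega) (by rw [hpk]; ring) ht (by omega)]
      have hjlog : j < Nat.log p.toNat t.toNat + 1 := by
        have hple : p.toNat ^ j ≤ t.toNat := by omega
        have := (Nat.le_log_iff_pow_le (by omega) (by omega)).mpr hple
        omega
      rw [Finset.sum_eq_sum_Ico_succ_bot hjlog]
      have hflo : PySem.Int.floordiv t pk = ((t.toNat / p.toNat ^ j : Nat) : Int) := by
        rw [PySem.Int.floordiv_eq_ediv_of_pos (by omega)]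
        calc t / pk = ((t.toNat : Nat) : Int) / ((p.toNat ^ j : Nat) : Int) := by
              rw [Int.toNat_of_nonneg (by omega), hpkN]
          _ = ((t.toNat / p.toNat ^ j : Nat) : Int) := (Int.natCast_div _ _).symm
      rw [hflo]
      push_cast
      ring
    · rw [if_neg hle]
      have : t < p ^ j := by omega
      rw [legendre_tail_zero t p j hp this]
      simp

lemma legendre_spec (t p : Int) (hp : 2 ≤ p) (ht : 1 < t) :
    legendre t p =
      ((∑ i ∈ Finset.Ico 1 (Nat.log p.toNat t.toNat + 1), t.toNat / p.toNat ^ i : Nat) : Int) := by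
  have := legendreLoop_spec (t.toNat + 1) t p p 0 1 hp le_rfl (by ring) ht (by omega)
  simpa [legendre] using this

-- a pair-accumulating fold is the pair of mapped sums
lemma fold_pair (f1 f2 : Int → Int) : ∀ (l : List Int) (a b : Int),
    l.foldl (fun (acc : Int × Int) i => (acc.1 + f1 i, acc.2 + f2 i)) (a, b) =
      (a + (l.map f1).sum, b + (l.map f2).sum) := by
  intro l
  induction l with
  | nil => simp
  | cons x xs ihl =>
    intro a b
    simp only [List.foldl_cons, List.map_cons, List.sum_cons, ihl]
    simp only [Prod.mk.injEq]
    constructor <;> ring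

lemma list_range_sum (g : Nat → Int) : ∀ (n : Nat),
    ((List.range n).map g).sum = ∑ i ∈ Finset.range n, g i := by
  intro n
  induction n with
  | zero => simp
  | succ m ihm => rw [List.range_succ, Finset.sum_range_succ, List.map_append, List.sum_append, ihm]; simp

-- A's total for one prime p: the valuation of t!
lemma range_vp_sum (t : Int) (p : Nat) [hp : Fact p.Prime] (ht : 1 < t) :
    ((PySem.List.pyRange 2 (t + 1) 1).map (fun i => (padicValNat p i.toNat : Int))).sum =
      (padicValNat p (Nat.factorial t.toNat) : Int) := by
  rw [PySem.List.pyRange_one, List.map_map, list_range_sum]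
  rw [← sum_padic_eq_factorial p t.toNat]
  rw [show ((t + 1 - 2).toNat) = t.toNat + 1 - 2 by omega]
  rw [Finset.sum_Ico_eq_sum_range]
  rw [Nat.cast_sum]
  refine Finset.sum_congr rfl fun k _ => ?_
  simp only [Function.comp_apply]
  have hk : ((2 + (k : Int))).toNat = 2 + k := by omega
  rw [hk]

theorem factNTen_eq (t : Int) : factNTen t = factNTen_alt t := by
  haveI i5 : Fact (Nat.Prime 5) := ⟨by norm_num⟩
  by_cases ht : t ≤ 1
  · have hnil : PySem.List.pyRange 2 (t + 1) 1 = [] :=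
      PySem.List.pyRange_one_eq_nil (by omega)
    have hleg : ∀ p : Int, 2 ≤ p → legendre t p = 0 := by
      intro p hp
      simp only [legendre, legendreLoop]
      rw [if_neg (by omega)]
    simp [factNTen, factNTen_alt, hnil, hleg 2 (by norm_num), hleg 5 (by norm_num)]
  · rw [not_le] at ht
    have hmap2 :
        (PySem.List.pyRange 2 (t + 1) 1).map (fun i => PySem.List.pyGetD (nTen i) 0 0) =
          (PySem.List.pyRange 2 (t + 1) 1).map (fun i => (padicValNat 2 i.toNat : Int)) := by
      refine List.map_congr_left fun i hi => ?_
      have hmem := (PySem.List.mem_pyRange_one).mp hi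
      rw [nTen_spec i (by omega)]
      simp [PySem.List.pyGetD, PySem.List.pyGet?, PySem.List.pyIdx?]
    have hmap5 :
        (PySem.List.pyRange 2 (t + 1) 1).map (fun i => PySem.List.pyGetD (nTen i) 1 0) =
          (PySem.List.pyRange 2 (t + 1) 1).map (fun i => (padicValNat 5 i.toNat : Int)) := by
      refine List.map_congr_left fun i hi => ?_
      have hmem := (PySem.List.mem_pyRange_one).mp hi
      rw [nTen_spec i (by omega)]
      simp [PySem.List.pyGetD, PySem.List.pyGet?, PySem.List.pyIdx?]
    show
      (let r := (PySem.List.pyRange 2 (t+1) 1).foldl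
        (fun (acc : Int × Int) i =>
          (acc.1 + PySem.List.pyGetD (nTen i) 0 0, acc.2 + PySem.List.pyGetD (nTen i) 1 0)) (0, 0);
       [r.1, r.2]) = factNTen_alt t
    rw [fold_pair (fun i => PySem.List.pyGetD (nTen i) 0 0)
      (fun i => PySem.List.pyGetD (nTen i) 1 0), hmap2, hmap5,
      range_vp_sum t 2 ht, range_vp_sum t 5 ht]
    simp only [factNTen_alt]
    rw [legendre_spec t 2 (by norm_num) ht, legendre_spec t 5 (by norm_num) ht]
    rw [padicValNat_factorial (p := 2)
      (show Nat.log 2 t.toNat < Nat.log 2 t.toNat + 1 by omega)]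
    rw [padicValNat_factorial (p := 5)
      (show Nat.log 5 t.toNat < Nat.log 5 t.toNat + 1 by omega)]
    norm_num [show ((2 : Int)).toNat = 2 from rfl, show ((5 : Int)).toNat = 5 from rfl]

-- ===== VERDICT (by name: the statement is the Claim_ definition above) =====
theorem factNTen_spec : Claim_equal_factNTen := by
  intro t _
  unfold Spec_factNTen
  exact factNTen_eq t
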